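-- pv_equiv track=rewrite | github.com/hyfi06/pcic-daa241 | tarea4/count_investor.py | merge_sort_s_count
-- ===== SOURCE A (Python) =====
-- def merge_iter(L, R):
--     n = len(L)
--     m = len(R)
--     out = [0]*(n+m)
--     i, j, k = 0, 0, 0
--     while i < n and j < m:
--         if L[i] <= R[j]:
--             out[k] = L[i]
--             i += 1
--         else:
--             out[k] = R[j]
--             j += 1
--         k += 1
--     while i < n:
--         out[k] = L[i]
--         i += 1
--         k += 1
--     while j < m:
--         out[k] = R[j]
--         j += 1
--         k += 1
--     return out
--
-- def count_inversiones(L, R):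
--     n, m = len(L),  len(R)
--     count, i, j, k = 0, 0, 0, 0
--     while i < n and j < m:
--         if L[i] <= R[j]:
--             i += 1
--         else:
--             count += n - i
--             j += 1
--         k += 1
--     return count
--
-- def merge_sort_s_count(A):
--     n = len(A)
--     if n < 2:
--         return A[:], 0
--     L = A[:n//2]
--     R = A[n//2:]
--     L_sorted, L_count = merge_sort_s_count(L)
--     R_sorted, R_count = merge_sort_s_count(R)
--     L_R_merge = merge_iter(L_sorted, R_sorted)
--     L_R_merge_count = count_inversiones(L_sorted,  [2*r for r in R_sorted])
--     return L_R_merge, L_R_merge_count + L_count + R_count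
-- ===== SOURCE B (Python) =====
-- def merge_sort_s_count(A):
--     count = 0
--     seen = []
--     for x in A:
--         count += sum(1 for y in seen if y > 2 * x)
--         seen.append(x)
--     return sorted(A), count
-- ===== Notes on version B (the rewrite author's own statement) =====
-- stated objective: simpler
-- what changed: Replaces recursive merge sort with cross-half inversion counting by a single left-to-right scan that counts earlier elements y with y > 2*x directly, plus the built-in sorted() for the sorted output.
import Mathlib
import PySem

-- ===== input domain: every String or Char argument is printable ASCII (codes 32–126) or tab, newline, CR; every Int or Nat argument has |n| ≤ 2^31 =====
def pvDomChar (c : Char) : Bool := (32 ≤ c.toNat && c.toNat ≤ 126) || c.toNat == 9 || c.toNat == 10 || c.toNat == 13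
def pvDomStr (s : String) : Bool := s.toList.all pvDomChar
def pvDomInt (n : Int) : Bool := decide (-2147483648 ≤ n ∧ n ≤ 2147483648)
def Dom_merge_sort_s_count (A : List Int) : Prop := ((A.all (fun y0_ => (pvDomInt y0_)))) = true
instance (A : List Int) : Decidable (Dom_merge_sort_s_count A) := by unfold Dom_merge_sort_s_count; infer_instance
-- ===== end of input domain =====

-- B replaces the recursive merge sort with a direct one-pass scan counting earlier elements y with y > 2*x, plus sorted(); simpler, not faster.

-- ===== PORT A =====
-- merge_iter: the index/while merge loop, as the obvious structural recursion on the same comparisons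
def mergeIter : List Int → List Int → List Int
  | [], ys => ys
  | x :: xs, [] => x :: xs
  | x :: xs, y :: ys => if x ≤ y then x :: mergeIter xs (y :: ys) else y :: mergeIter (x :: xs) ys

-- count_inversiones: the while loop; 'count += n - i' is the remaining length of L
def countInv : List Int → List Int → Int
  | [], _ => 0
  | _ :: _, [] => 0
  | l :: ls, r :: rs =>
    if l ≤ r then countInv ls (r :: rs)
    else ((ls.length : Int) + 1) + countInv (l :: ls) rs

def merge_sort_s_count (A : List Int) : List Int × Int :=
  if _h : A.length < 2 then (A, 0)
  else
    let L := A.take (A.length / 2)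
    let R := A.drop (A.length / 2)
    let pL := merge_sort_s_count L
    let pR := merge_sort_s_count R
    (mergeIter pL.1 pR.1, countInv pL.1 (pR.1.map (fun r => 2 * r)) + pL.2 + pR.2)
termination_by A.length
decreasing_by
  · simp only [List.length_take]; omega
  · simp only [List.length_drop]; omega

-- ===== PORT B =====
-- one scan: count earlier seen elements y with y > 2*x, then append x to seen
def altStep (st : List Int × Int) (x : Int) : List Int × Int :=
  (st.1 ++ [x], st.2 + ((st.1.countP (fun y => decide (2 * x < y)) : Nat) : Int))

def merge_sort_s_count_alt (A : List Int) : List Int × Int :=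
  (PySem.List.sorted A (fun x => x) false, (A.foldl altStep ([], 0)).2)

-- ===== PRECONDITION & SPEC =====
def Spec_merge_sort_s_count (A : List Int) (out : List Int × Int) : Prop := out = merge_sort_s_count_alt A
instance (A : List Int) (out : List Int × Int) : Decidable (Spec_merge_sort_s_count A out) := by unfold Spec_merge_sort_s_count; infer_instance

-- ===== CLAIM (what is proved, stated in full; the proofs are below) =====
def Claim_equal_merge_sort_s_count : Prop := ∀ (A : List Int), Dom_merge_sort_s_count A → Spec_merge_sort_s_count A (merge_sort_s_count A)

-- ===== LEMMAS AND PROOFS =====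

-- number of pairs i < j with A[i] > 2*A[j]
def pairCount : List Int → Int
  | [] => 0
  | x :: xs => ((xs.countP (fun r => decide (2 * r < x)) : Nat) : Int) + pairCount xs

-- cross pairs (l, r) ∈ X × Y with l > 2*r
def crossC (X Y : List Int) : Int :=
  (Y.map (fun r => ((X.countP (fun l => decide (2 * r < l)) : Nat) : Int))).sum

theorem mergeIter_perm : ∀ xs ys : List Int, (mergeIter xs ys).Perm (xs ++ ys) := by
  intro xs
  induction xs with
  | nil => intro ys; simp [mergeIter]
  | cons x xs ihx =>
    intro ys
    induction ys with
    | nil => simp [mergeIter]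
    | cons y ys ihy =>
      simp only [mergeIter]
      split
      · exact (ihx (y :: ys)).cons x
      · exact (ihy.cons y).trans List.perm_middle.symm

theorem mergeIter_pairwise : ∀ xs ys : List Int, xs.Pairwise (· ≤ ·) → ys.Pairwise (· ≤ ·) →
    (mergeIter xs ys).Pairwise (· ≤ ·) := by
  intro xs
  induction xs with
  | nil => intro ys _ hy; simpa [mergeIter]
  | cons x xs ihx =>
    intro ys hx hy
    induction ys with
    | nil => simp only [mergeIter]; exact hx
    | cons y ys ihy =>
      simp only [mergeIter]
      split
      · rename_i hxy
        refine List.Pairwise.cons ?_ (ihx (y :: ys) (List.Pairwise.of_cons hx) hy)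
        intro b hb
        have hb' : b ∈ xs ++ y :: ys := (mergeIter_perm xs (y :: ys)).mem_iff.mp hb
        rcases List.mem_append.mp hb' with h | h
        · exact (List.pairwise_cons.mp hx).1 b h
        · rcases List.mem_cons.mp h with rfl | h
          · exact hxy
          · exact le_trans hxy ((List.pairwise_cons.mp hy).1 b h)
      · rename_i hxy
        rw [not_le] at hxy
        refine List.Pairwise.cons ?_ (ihy (List.Pairwise.of_cons hy))
        intro b hb
        have hb' : b ∈ (x :: xs) ++ ys := (mergeIter_perm (x :: xs) ys).mem_iff.mp hb
        rcases List.mem_append.mp hb' with h | h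
        · rcases List.mem_cons.mp h with rfl | h
          · exact le_of_lt hxy
          · exact le_trans (le_of_lt hxy) ((List.pairwise_cons.mp hx).1 b h)
        · exact (List.pairwise_cons.mp hy).1 b h

theorem countInv_spec : ∀ X Y : List Int, X.Pairwise (· ≤ ·) → Y.Pairwise (· ≤ ·) →
    countInv X Y = (Y.map (fun r => ((X.countP (fun l => decide (r < l)) : Nat) : Int))).sum := by
  intro X
  induction X with
  | nil => intro Y _ _; simp [countInv]
  | cons l ls ihl =>
    intro Y hX hY
    induction Y with
    | nil => simp [countInv]
    | cons r rs ihr =>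
      simp only [countInv]
      split
      · rename_i hlr
        rw [ihl (r :: rs) (List.Pairwise.of_cons hX) hY]
        have hcnt : ∀ r' ∈ r :: rs, ((l :: ls).countP (fun l' => decide (r' < l')))
            = ls.countP (fun l' => decide (r' < l')) := by
          intro r' hr'
          have hlr' : l ≤ r' := by
            rcases List.mem_cons.mp hr' with rfl | h
            · exact hlr
            · exact le_trans hlr ((List.pairwise_cons.mp hY).1 r' h)
          simp [not_lt.mpr hlr']
        have hmap : List.map (fun r' => ((List.countP (fun l' => decide (r' < l')) (l :: ls) : Nat) : Int)) (r :: rs)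
            = List.map (fun r' => ((List.countP (fun l' => decide (r' < l')) ls : Nat) : Int)) (r :: rs) :=
          List.map_congr_left (fun r' hr' => by rw [hcnt r' hr'])
        rw [hmap]
      · rename_i hlr
        rw [not_le] at hlr
        rw [ihr (List.Pairwise.of_cons hY)]
        simp only [List.map_cons, List.sum_cons]
        have hall : (l :: ls).countP (fun l' => decide (r < l')) = (l :: ls).length := by
          rw [List.countP_eq_length]
          intro l' hl'
          rcases List.mem_cons.mp hl' with rfl | h
          · simpa using hlr
          · simpa using lt_of_lt_of_le hlr ((List.pairwise_cons.mp hX).1 l' h)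
        rw [hall]
        simp only [List.length_cons]
        push_cast
        ring

theorem sum_map_indicator (p : Int → Bool) : ∀ xs : List Int,
    (xs.map (fun r => if p r then (1 : Int) else 0)).sum = ((xs.countP p : Nat) : Int) := by
  intro xs
  induction xs with
  | nil => simp
  | cons x xs ih =>
    simp only [List.map_cons, List.sum_cons, List.countP_cons, ih]
    split
    · push_cast; ring
    · simp

theorem crossC_nil_left (Y : List Int) : crossC [] Y = 0 := by
  simp [crossC]

theorem crossC_cons_left (x : Int) (X Y : List Int) :
    crossC (x :: X) Y = crossC X Y + ((Y.countP (fun r => decide (2 * r < x)) : Nat) : Int) := by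
  unfold crossC
  rw [← sum_map_indicator (fun r => decide (2 * r < x)) Y, ← List.sum_map_add]
  refine congrArg List.sum (List.map_congr_left ?_)
  intro r _
  simp only [List.countP_cons]
  push_cast
  by_cases h : 2 * r < x <;> simp [h]

theorem crossC_append_singleton (X : List Int) (x : Int) (Y : List Int) :
    crossC (X ++ [x]) Y = crossC X Y + ((Y.countP (fun r => decide (2 * r < x)) : Nat) : Int) := by
  unfold crossC
  rw [← sum_map_indicator (fun r => decide (2 * r < x)) Y, ← List.sum_map_add]
  refine congrArg List.sum (List.map_congr_left ?_)
  intro r _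
  simp only [List.countP_append, List.countP_cons, List.countP_nil]
  push_cast
  by_cases h : 2 * r < x <;> simp [h]

theorem pairCount_append : ∀ X Y : List Int, pairCount (X ++ Y) = pairCount X + pairCount Y + crossC X Y := by
  intro X Y
  induction X with
  | nil => simp [pairCount, crossC_nil_left]
  | cons x X ih =>
    simp only [List.cons_append, pairCount, ih, List.countP_append, crossC_cons_left]
    push_cast
    ring

theorem crossC_perm {X X' Y Y' : List Int} (hx : X.Perm X') (hy : Y.Perm Y') :
    crossC X Y = crossC X' Y' := by
  unfold crossC
  have h1 : ∀ r : Int, X.countP (fun l => decide (2 * r < l)) = X'.countP (fun l => decide (2 * r < l)) :=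
    fun r => hx.countP_eq _
  calc (Y.map (fun r => ((X.countP (fun l => decide (2 * r < l)) : Nat) : Int))).sum
      = (Y.map (fun r => ((X'.countP (fun l => decide (2 * r < l)) : Nat) : Int))).sum := by
        rw [List.map_congr_left (fun r _ => by rw [h1 r])]
    _ = (Y'.map (fun r => ((X'.countP (fun l => decide (2 * r < l)) : Nat) : Int))).sum :=
        (hy.map _).sum_eq

-- characterisation of A's port: sorted permutation plus the pair count
theorem msc_char (A : List Int) :
    (merge_sort_s_count A).1.Perm A ∧ (merge_sort_s_count A).1.Pairwise (· ≤ ·) ∧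
      (merge_sort_s_count A).2 = pairCount A := by
  fun_induction merge_sort_s_count A with
  | case1 A h =>
    match A, h with
    | [], _ => simp [pairCount]
    | [x], _ => simp [pairCount]
  | case2 A h L R pL pR ihL ihR =>
    obtain ⟨hLp, hLs, hLc⟩ := ihL
    obtain ⟨hRp, hRs, hRc⟩ := ihR
    have hsplit : L ++ R = A := List.take_append_drop _ _
    constructor
    · exact (mergeIter_perm pL.1 pR.1).trans (by rw [← hsplit]; exact hLp.append hRp)
    constructor
    · exact mergeIter_pairwise _ _ hLs hRs
    · have h2 : (pR.1.map (fun r => 2 * r)).Pairwise (· ≤ ·) :=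
        List.Pairwise.map _ (fun a b hab => by omega) hRs
      rw [countInv_spec pL.1 (pR.1.map (fun r => 2 * r)) hLs h2]
      have hcross : ((pR.1.map (fun r => 2 * r)).map
            (fun r => ((pL.1.countP (fun l => decide (r < l)) : Nat) : Int))).sum
          = crossC pL.1 pR.1 := by
        unfold crossC; rw [List.map_map]; rfl
      rw [hcross, crossC_perm hLp hRp, hLc, hRc, ← hsplit, pairCount_append]
      ring

theorem alt_fold : ∀ (xs : List Int) (seen : List Int) (c : Int),
    (xs.foldl altStep (seen, c)).2 = c + crossC seen xs + pairCount xs := by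
  intro xs
  induction xs with
  | nil => intro seen c; simp [pairCount, crossC]
  | cons x xs ih =>
    intro seen c
    simp only [List.foldl_cons, altStep, ih, crossC_append_singleton, pairCount]
    have : crossC seen (x :: xs)
        = ((seen.countP (fun y => decide (2 * x < y)) : Nat) : Int) + crossC seen xs := by
      simp [crossC]
    rw [this]
    ring

theorem alt_count (A : List Int) : (A.foldl altStep ([], 0)).2 = pairCount A := by
  rw [alt_fold A [] 0, crossC_nil_left]; ring

-- ===== VERDICT (by name: the statement is the Claim_ definition above) =====
theorem merge_sort_s_count_spec : Claim_equal_merge_sort_s_count := by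
  intro A _
  unfold Spec_merge_sort_s_count merge_sort_s_count_alt
  obtain ⟨hp, hs, hc⟩ := msc_char A
  refine Prod.ext ?_ ?_
  · exact (PySem.List.sorted_id_eq_of_perm_of_pairwise A (merge_sort_s_count A).1 hp hs).symm
  · simp [alt_count, hc]
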